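-- pv_equiv track=rewrite | github.com/X10NLUN1X/Xionimus | backend/agents/qa_agent.py | _identify_qa_task_type
-- ===== SOURCE A (Python) =====
-- def _identify_qa_task_type(description: str) -> str:
--     """Identify the type of QA task"""
--     description_lower = description.lower()
--
--     if any(word in description_lower for word in ['unit test', 'unit testing']):
--         return "unit_testing"
--     elif any(word in description_lower for word in ['integration test', 'integration testing']):
--         return "integration_testing"
--     elif any(word in description_lower for word in ['e2e', 'end to end', 'end-to-end']):
--         return "e2e_testing"
--     elif any(word in description_lower for word in ['performance', 'load', 'stress']):
--         return "performance_testing"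
--     elif any(word in description_lower for word in ['security', 'penetration', 'vulnerability']):
--         return "security_testing"
--     elif any(word in description_lower for word in ['automation', 'automated', 'ci/cd']):
--         return "test_automation"
--     elif any(word in description_lower for word in ['usability', 'user experience', 'ux']):
--         return "usability_testing"
--     elif any(word in description_lower for word in ['api', 'rest', 'graphql']):
--         return "api_testing"
--     else:
--         return "general_testing"
-- ===== SOURCE B (Python) =====
-- # B: min-over-matches with an explicit accumulator instead of an if/elif cascade:
-- # scan one keyword->priority table, keep the smallest matching priority, index a label table.
-- _QA_KEYWORDS = [
--     ('unit test', 0), ('unit testing', 0),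
--     ('integration test', 1), ('integration testing', 1),
--     ('e2e', 2), ('end to end', 2), ('end-to-end', 2),
--     ('performance', 3), ('load', 3), ('stress', 3),
--     ('security', 4), ('penetration', 4), ('vulnerability', 4),
--     ('automation', 5), ('automated', 5), ('ci/cd', 5),
--     ('usability', 6), ('user experience', 6), ('ux', 6),
--     ('api', 7), ('rest', 7), ('graphql', 7),
-- ]
-- _QA_LABELS = [
--     'unit_testing', 'integration_testing', 'e2e_testing', 'performance_testing',
--     'security_testing', 'test_automation', 'usability_testing', 'api_testing',
--     'general_testing',
-- ]
--
-- def _identify_qa_task_type(description: str) -> str: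
--     low = description.lower()
--     best = 8
--     for kw, p in _QA_KEYWORDS:
--         if p < best and kw in low:
--             best = p
--     return _QA_LABELS[best]
-- ===== Notes on version B (the rewrite author's own statement) =====
-- stated objective: alternative
-- what changed: Replaces the if/elif keyword cascade (early return on the first matching group) with a single data-driven pass: one keyword->priority table is scanned with an accumulator keeping the smallest matching priority, and the result indexes a label table.
import Mathlib
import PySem

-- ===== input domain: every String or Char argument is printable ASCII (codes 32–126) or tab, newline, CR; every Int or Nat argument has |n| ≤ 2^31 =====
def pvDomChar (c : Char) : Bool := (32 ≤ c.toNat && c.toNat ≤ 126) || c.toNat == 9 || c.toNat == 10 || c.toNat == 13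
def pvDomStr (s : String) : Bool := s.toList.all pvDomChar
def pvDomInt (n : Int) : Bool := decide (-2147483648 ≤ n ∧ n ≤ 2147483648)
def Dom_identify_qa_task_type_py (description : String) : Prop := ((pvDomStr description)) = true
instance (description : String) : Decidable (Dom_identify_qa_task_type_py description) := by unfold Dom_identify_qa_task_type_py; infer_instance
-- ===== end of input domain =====

-- B replaces A's if/elif keyword cascade by a single accumulator scan over a keyword->priority
-- table (keep the smallest matching priority) followed by a label-table lookup; objective: alternative/data-driven.

-- ===== PORT A =====
def identify_qa_task_type_py (description : String) : String :=
  let dl := PySem.Str.lower description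
  if (["unit test", "unit testing"].any (fun word => PySem.Str.isIn word dl)) then "unit_testing"
    else if (["integration test", "integration testing"].any (fun word => PySem.Str.isIn word dl)) then "integration_testing"
    else if (["e2e", "end to end", "end-to-end"].any (fun word => PySem.Str.isIn word dl)) then "e2e_testing"
    else if (["performance", "load", "stress"].any (fun word => PySem.Str.isIn word dl)) then "performance_testing"
    else if (["security", "penetration", "vulnerability"].any (fun word => PySem.Str.isIn word dl)) then "security_testing"
    else if (["automation", "automated", "ci/cd"].any (fun word => PySem.Str.isIn word dl)) then "test_automation"
    else if (["usability", "user experience", "ux"].any (fun word => PySem.Str.isIn word dl)) then "usability_testing"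
    else if (["api", "rest", "graphql"].any (fun word => PySem.Str.isIn word dl)) then "api_testing"
  else "general_testing"

-- ===== PORT B =====
def qaKeywords : List (String × Int) := [("unit test", 0), ("unit testing", 0), ("integration test", 1), ("integration testing", 1), ("e2e", 2), ("end to end", 2), ("end-to-end", 2), ("performance", 3), ("load", 3), ("stress", 3), ("security", 4), ("penetration", 4), ("vulnerability", 4), ("automation", 5), ("automated", 5), ("ci/cd", 5), ("usability", 6), ("user experience", 6), ("ux", 6), ("api", 7), ("rest", 7), ("graphql", 7)]
def qaLabels : List String := ["unit_testing", "integration_testing", "e2e_testing", "performance_testing", "security_testing", "test_automation", "usability_testing", "api_testing", "general_testing"]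

def identify_qa_task_type_py_alt (description : String) : String :=
  let low := PySem.Str.lower description
  let best := qaKeywords.foldl (fun best kp => if kp.2 < best ∧ PySem.Str.isIn kp.1 low then kp.2 else best) 8
  -- _QA_LABELS[best]: best is always in [0, 8], so the index is in range (default never used)
  PySem.List.pyGetD qaLabels best ""

-- ===== PRECONDITION & SPEC =====
def Spec_identify_qa_task_type_py (description : String) (out : String) : Prop := out = identify_qa_task_type_py_alt description
instance (description : String) (out : String) : Decidable (Spec_identify_qa_task_type_py description out) := by unfold Spec_identify_qa_task_type_py; infer_instance

-- ===== CLAIM (what is proved, stated in full; the proofs are below) =====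
def Claim_equal_identify_qa_task_type_py : Prop := ∀ (description : String), Dom_identify_qa_task_type_py description → Spec_identify_qa_task_type_py description (identify_qa_task_type_py description)

-- ===== LEMMAS AND PROOFS =====

-- ===== VERDICT (by name: the statement is the Claim_ definition above) =====
theorem identify_qa_task_type_py_spec : Claim_equal_identify_qa_task_type_py := by
  intro d _
  unfold Spec_identify_qa_task_type_py identify_qa_task_type_py identify_qa_task_type_py_alt qaKeywords qaLabels
  by_cases h0 : PySem.Str.isIn "unit test" (PySem.Str.lower d) = true
  · simp_all [PySem.List.pyGetD]
  by_cases h1 : PySem.Str.isIn "unit testing" (PySem.Str.lower d) = true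
  · simp_all [PySem.List.pyGetD]
  by_cases h2 : PySem.Str.isIn "integration test" (PySem.Str.lower d) = true
  · simp_all [PySem.List.pyGetD]
  by_cases h3 : PySem.Str.isIn "integration testing" (PySem.Str.lower d) = true
  · simp_all [PySem.List.pyGetD]
  by_cases h4 : PySem.Str.isIn "e2e" (PySem.Str.lower d) = true
  · simp_all [PySem.List.pyGetD]
  by_cases h5 : PySem.Str.isIn "end to end" (PySem.Str.lower d) = true
  · simp_all [PySem.List.pyGetD]
  by_cases h6 : PySem.Str.isIn "end-to-end" (PySem.Str.lower d) = true
  · simp_all [PySem.List.pyGetD]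
  by_cases h7 : PySem.Str.isIn "performance" (PySem.Str.lower d) = true
  · simp_all [PySem.List.pyGetD]
  by_cases h8 : PySem.Str.isIn "load" (PySem.Str.lower d) = true
  · simp_all [PySem.List.pyGetD]
  by_cases h9 : PySem.Str.isIn "stress" (PySem.Str.lower d) = true
  · simp_all [PySem.List.pyGetD]
  by_cases h10 : PySem.Str.isIn "security" (PySem.Str.lower d) = true
  · simp_all [PySem.List.pyGetD]
  by_cases h11 : PySem.Str.isIn "penetration" (PySem.Str.lower d) = true
  · simp_all [PySem.List.pyGetD]
  by_cases h12 : PySem.Str.isIn "vulnerability" (PySem.Str.lower d) = true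
  · simp_all [PySem.List.pyGetD]
  by_cases h13 : PySem.Str.isIn "automation" (PySem.Str.lower d) = true
  · simp_all [PySem.List.pyGetD]
  by_cases h14 : PySem.Str.isIn "automated" (PySem.Str.lower d) = true
  · simp_all [PySem.List.pyGetD]
  by_cases h15 : PySem.Str.isIn "ci/cd" (PySem.Str.lower d) = true
  · simp_all [PySem.List.pyGetD]
  by_cases h16 : PySem.Str.isIn "usability" (PySem.Str.lower d) = true
  · simp_all [PySem.List.pyGetD]
  by_cases h17 : PySem.Str.isIn "user experience" (PySem.Str.lower d) = true
  · simp_all [PySem.List.pyGetD]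
  by_cases h18 : PySem.Str.isIn "ux" (PySem.Str.lower d) = true
  · simp_all [PySem.List.pyGetD]
  by_cases h19 : PySem.Str.isIn "api" (PySem.Str.lower d) = true
  · simp_all [PySem.List.pyGetD]
  by_cases h20 : PySem.Str.isIn "rest" (PySem.Str.lower d) = true
  · simp_all [PySem.List.pyGetD]
  by_cases h21 : PySem.Str.isIn "graphql" (PySem.Str.lower d) = true
  · simp_all [PySem.List.pyGetD]
  simp_all [PySem.List.pyGetD]
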